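-- pv_equiv track=rewrite | github.com/2020-ASW/gayoung_yoon | 1월 2주차/[PROGRAMMERS] 최고의 집합.py | solution
-- ===== SOURCE A (Python) =====
-- def solution(n, s):
--     if n > s:
--         return [-1]
--
--     a, b = divmod(s, n)
--     temp = [a] * n
--     for i in range(1, b + 1):
--         temp[i-1] += 1
--
--     temp = sorted(temp)
--     return temp
-- ===== SOURCE B (Python) =====
-- def solution(n, s):
--     if n > s:
--         return [-1]
--     return [(s + i) // n for i in range(n)]
-- ===== Notes on version B (the rewrite author's own statement) =====
-- stated objective: alternative
-- what changed: B computes each element of the answer independently by the per-index closed form (s+i)//n over range(n) -- no divmod split into quotient/remainder, no mutation loop and no sort.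
import Mathlib
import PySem

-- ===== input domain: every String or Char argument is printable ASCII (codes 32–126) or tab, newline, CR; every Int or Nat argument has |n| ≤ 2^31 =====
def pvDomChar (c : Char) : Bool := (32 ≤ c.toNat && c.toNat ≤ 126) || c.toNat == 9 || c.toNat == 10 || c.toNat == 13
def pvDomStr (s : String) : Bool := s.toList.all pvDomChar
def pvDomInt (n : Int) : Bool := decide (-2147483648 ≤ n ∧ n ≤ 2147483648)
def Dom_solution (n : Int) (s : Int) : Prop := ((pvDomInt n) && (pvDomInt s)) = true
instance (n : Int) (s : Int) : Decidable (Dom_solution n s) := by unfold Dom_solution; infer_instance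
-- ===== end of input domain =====

-- B computes each element independently by the per-index closed form (s+i)//n over range(n)
-- (no divmod split, no mutation loop, no sort); objective: alternative.

-- ===== PORT A =====
def solution (n : Int) (s : Int) : List Int :=
  if n > s then [-1]
  else
    match PySem.Int.divmod? s n with
    | none => []   -- Python raises ZeroDivisionError here; excluded by Pre_solution
    | some (a, b) =>
      let temp := List.replicate n.toNat a
      let temp := (PySem.List.pyRange 1 (b + 1) 1).foldl
        (fun t i => PySem.List.pySetD t (i - 1) (PySem.List.pyGetD t (i - 1) 0 + 1)) temp
      PySem.List.sorted temp (fun x => x) false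

-- ===== PORT B =====
def solution_alt (n : Int) (s : Int) : List Int :=
  if n > s then [-1]
  else (PySem.List.pyRange 0 n 1).map (fun i => PySem.Int.floordiv (s + i) n)

-- ===== PRECONDITION & SPEC =====
-- Pre_ excludes exactly n = 0 with 0 ≤ s, where Python's divmod(s, n) in A raises ZeroDivisionError.
def Pre_solution (n : Int) (s : Int) : Prop := ¬ (n = 0 ∧ 0 ≤ s)
instance (n : Int) (s : Int) : Decidable (Pre_solution n s) := by unfold Pre_solution; infer_instance
def pvWitness_solution : Int × Int := (3, 10)

def Spec_solution (n : Int) (s : Int) (out : List Int) : Prop := out = solution_alt n s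
instance (n : Int) (s : Int) (out : List Int) : Decidable (Spec_solution n s out) := by unfold Spec_solution; infer_instance

-- ===== CLAIM (what is proved, stated in full; the proofs are below) =====
def Claim_equal_solution : Prop := ∀ (n : Int) (s : Int), Dom_solution n s → Pre_solution n s → Spec_solution n s (solution n s)

-- ===== LEMMAS AND PROOFS =====

-- A's loop: incrementing slots 0..k-1 of [a]*m turns it into [a+1]*k ++ [a]*(m-k)
lemma loop_incr (a : Int) :
    ∀ (k m : Nat), k ≤ m →
      (PySem.List.pyRange 1 ((k : Int) + 1) 1).foldl
        (fun t i => PySem.List.pySetD t (i - 1) (PySem.List.pyGetD t (i - 1) 0 + 1))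
        (List.replicate m a)
      = List.replicate k (a + 1) ++ List.replicate (m - k) a := by
  intro k
  induction k with
  | zero => intro m _; simp [pysem]
  | succ k ih =>
    intro m hkm
    obtain ⟨j, hj⟩ : ∃ j, m - k = j + 1 := ⟨m - k - 1, by omega⟩
    have hsplit : PySem.List.pyRange 1 (((k + 1 : Nat) : Int) + 1) 1
        = PySem.List.pyRange 1 ((k : Int) + 1) 1 ++ [(k : Int) + 1] := by
      push_cast
      rw [show ((k : Int) + 1 + 1) = ((k : Int) + 1) + 1 by ring,
        PySem.List.pyRange_one_succ_right (by omega)]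
    rw [hsplit, List.foldl_append, ih m (by omega)]
    simp only [List.foldl_cons, List.foldl_nil]
    have hi : ((k : Int) + 1 - 1) = ((k : Nat) : Int) := by ring
    rw [hi, PySem.List.pyGetD_natCast, PySem.List.pySetD_natCast]
    have hg : (List.replicate k (a + 1) ++ List.replicate (m - k) a).getD k 0 = a := by
      rw [List.getD_append_right] <;> simp [hj]
    have hs : ∀ v : Int, (List.replicate k (a + 1) ++ List.replicate (m - k) a).set k v
        = List.replicate k (a + 1) ++ (List.replicate (m - k) a).set 0 v := by
      intro v; rw [List.set_append_right] <;> simp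
    rw [hg, hs, hj]
    rw [List.replicate_succ, List.set_cons_zero]
    rw [show (a + 1) :: List.replicate j a = [a + 1] ++ List.replicate j a from rfl,
      ← List.append_assoc, ← List.replicate_succ', List.replicate_succ,
      show m - (k + 1) = j by omega]

-- A's loop keeps the empty list empty (the n < 0 case, where [a]*n = [])
lemma foldl_nil_state (L : List Int) :
    L.foldl (fun t i => PySem.List.pySetD t (i - 1) (PySem.List.pyGetD t (i - 1) 0 + 1))
      ([] : List Int) = [] := by
  induction L with
  | nil => rfl
  | cons x xs ih =>
    have h0 : ∀ i v : Int, PySem.List.pySetD ([] : List Int) i v = [] := by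
      intro i v
      simp only [PySem.List.pySetD, PySem.List.pySet?, PySem.List.pyIdx?]
      split_ifs <;> simp
    simpa [h0] using ih

-- A's value on 0 < n: the sorted runs [a]*(n-b) ++ [a+1]*b
lemma solutionA_runs (n s : Int) (hns : ¬ n > s) (hpos : 0 < n) :
    solution n s
      = List.replicate (n - PySem.Int.mod s n).toNat (PySem.Int.floordiv s n)
        ++ List.replicate (PySem.Int.mod s n).toNat (PySem.Int.floordiv s n + 1) := by
  have hn : n ≠ 0 := by omega
  unfold solution
  have hdm : PySem.Int.divmod? s n = some (PySem.Int.floordiv s n, PySem.Int.mod s n) := by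
    simp [PySem.Int.divmod?, PySem.Int.floordiv, PySem.Int.mod, hn]
  rw [if_neg hns, hdm]
  dsimp only
  set a := PySem.Int.floordiv s n
  set b := PySem.Int.mod s n with hbdef
  have hb0 : 0 ≤ b := PySem.Int.mod_nonneg s hpos
  have hblt : b < n := PySem.Int.mod_lt s hpos
  have hbk : b = ((b.toNat : Nat) : Int) := by omega
  rw [hbk, loop_incr a b.toNat n.toNat (by omega)]
  rw [show (n - ((b.toNat : Nat) : Int)).toNat = n.toNat - b.toNat by omega,
    Int.toNat_natCast]
  apply PySem.List.sorted_id_eq_of_perm_of_pairwise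
  · exact List.perm_append_comm
  · rw [List.pairwise_append]
    refine ⟨List.pairwise_replicate.mpr (Or.inr le_rfl),
      List.pairwise_replicate.mpr (Or.inr le_rfl), ?_⟩
    intro x hx y hy
    rw [List.mem_replicate] at hx hy
    omega

-- B's closed form agrees with the runs pointwise: (s+i)//n = a for i < n-b, a+1 for n-b ≤ i < n
lemma floordiv_shift (n s i : Int) (hpos : 0 < n) (h0 : 0 ≤ i) (hlt : i < n) :
    PySem.Int.floordiv (s + i) n
      = if i < n - PySem.Int.mod s n then PySem.Int.floordiv s n
        else PySem.Int.floordiv s n + 1 := by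
  have hb0 : 0 ≤ PySem.Int.mod s n := PySem.Int.mod_nonneg s hpos
  have hblt : PySem.Int.mod s n < n := PySem.Int.mod_lt s hpos
  have hsum : PySem.Int.floordiv s n * n + PySem.Int.mod s n = s :=
    PySem.Int.floordiv_mul_add_mod s n
  split_ifs with h
  · rw [PySem.Int.floordiv_eq_iff_of_pos hpos]
    constructor <;> nlinarith
  · rw [PySem.Int.floordiv_eq_iff_of_pos hpos]
    constructor <;> nlinarith

-- ===== VERDICT (by name: the statement is the Claim_ definition above) =====
theorem solution_spec : Claim_equal_solution := by
  intro n s _ hpre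
  unfold Spec_solution solution_alt
  by_cases hns : n > s
  · unfold solution; simp [hns]
  · have hn : n ≠ 0 := by
      intro h; exact hpre ⟨h, by omega⟩
    rw [if_neg hns]
    rcases lt_or_gt_of_ne hn with hneg | hpos
    · -- n < 0: both sides are []
      unfold solution
      have hdm : PySem.Int.divmod? s n
          = some (PySem.Int.floordiv s n, PySem.Int.mod s n) := by
        simp [PySem.Int.divmod?, PySem.Int.floordiv, PySem.Int.mod, hn]
      rw [if_neg hns, hdm]
      dsimp only
      have hb := PySem.Int.mod_neg_bounds (a := s) hneg
      rw [show n.toNat = 0 by omega, List.replicate_zero, foldl_nil_state,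
        PySem.List.pyRange_one_eq_nil (by omega)]
      simp [pysem]
    · -- 0 < n
      rw [solutionA_runs n s hns hpos]
      set a := PySem.Int.floordiv s n
      set b := PySem.Int.mod s n with hbdef
      have hb0 : 0 ≤ b := PySem.Int.mod_nonneg s hpos
      have hblt : b < n := PySem.Int.mod_lt s hpos
      apply List.ext_getElem
      · simp [PySem.List.length_pyRange_one]; omega
      · intro i h1 h2
        have hi : i < n.toNat := by
          simpa [PySem.List.length_pyRange_one] using h2
        rw [List.getElem_map, PySem.List.getElem_pyRange_one]
        have hcast0 : (0 : Int) + (i : Int) = (i : Int) := by ring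
        rw [hcast0, floordiv_shift n s i hpos (by positivity) (by omega)]
        rw [← hbdef]
        by_cases hcase : (i : Int) < n - b
        · rw [if_pos hcase, List.getElem_append_left (by simp; omega),
            List.getElem_replicate]
        · rw [if_neg hcase, List.getElem_append_right (by simp; omega),
            List.getElem_replicate]
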